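-- pv_equiv track=rewrite | github.com/AMBIENT-6G/RF-waveform-optimization | scripts/plot_scope_avg_power.py | choose_reading_key
-- ===== SOURCE A (Python) =====
-- from typing import Any
--
-- def choose_reading_key(records: list[dict[str, Any]], requested_key: str) -> str:
--     if requested_key != "auto":
--         return requested_key
--
--     for candidate in ("scope_power_w", "pwr_pw"):
--         for record in records:
--             readings = record.get("readings", [])
--             if not isinstance(readings, list):
--                 continue
--             for reading in readings:
--                 if isinstance(reading, dict) and reading.get(candidate) is not None:
--                     return candidate
--
--     raise ValueError(
--         "Could not infer reading key. Pass --reading-key scope_power_w or --reading-key pwr_pw."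
--     )
-- ===== SOURCE B (Python) =====
-- def choose_reading_key(records, requested_key):
--     if requested_key != "auto":
--         return requested_key
--
--     pwr_seen = False
--     for record in records:
--         readings = record.get("readings", [])
--         if not isinstance(readings, list):
--             continue
--         for reading in readings:
--             if not isinstance(reading, dict):
--                 continue
--             if reading.get("scope_power_w") is not None:
--                 return "scope_power_w"
--             pwr_seen = pwr_seen or reading.get("pwr_pw") is not None
--     if pwr_seen:
--         return "pwr_pw"
--
--     raise ValueError(
--         "Could not infer reading key. Pass --reading-key scope_power_w or --reading-key pwr_pw."
--     )
-- ===== Notes on version B (the rewrite author's own statement) =====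
-- stated objective: alternative
-- what changed: B replaces A's two candidate-major full scans by a single short-circuiting pass that returns 'scope_power_w' as soon as it is seen while carrying a boolean flag for 'pwr_pw', checked after the loop.
import Mathlib
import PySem

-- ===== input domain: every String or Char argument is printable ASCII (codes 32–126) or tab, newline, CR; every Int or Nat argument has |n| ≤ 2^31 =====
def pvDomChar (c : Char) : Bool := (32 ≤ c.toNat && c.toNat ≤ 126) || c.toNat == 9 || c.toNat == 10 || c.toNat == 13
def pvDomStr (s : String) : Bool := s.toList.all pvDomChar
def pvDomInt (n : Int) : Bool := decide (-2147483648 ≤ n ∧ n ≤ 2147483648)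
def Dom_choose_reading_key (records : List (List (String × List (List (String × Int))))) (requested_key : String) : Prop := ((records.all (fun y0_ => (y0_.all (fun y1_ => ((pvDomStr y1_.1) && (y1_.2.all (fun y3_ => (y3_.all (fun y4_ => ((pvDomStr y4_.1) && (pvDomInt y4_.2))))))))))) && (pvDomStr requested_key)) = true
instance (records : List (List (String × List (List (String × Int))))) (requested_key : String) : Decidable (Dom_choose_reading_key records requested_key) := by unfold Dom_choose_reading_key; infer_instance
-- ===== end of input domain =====

-- B = one short-circuiting pass (early return on "scope_power_w", boolean flag for "pwr_pw")
-- instead of A's two candidate-major full scans (objective: alternative). Return value only; neither mutates.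

-- ===== PORT A =====
-- reading.get(candidate) is not None  (dicts are typed, so isinstance guards are always true)
def crkHit (reading : List (String × Int)) (c : String) : Bool :=
  ((PySem.Dict.mk reading).get? c).isSome

-- record.get("readings", [])
def crkReadings (record : List (String × List (List (String × Int)))) : List (List (String × Int)) :=
  (PySem.Dict.mk record).getD "readings" []

-- inner two loops of A for a fixed candidate: first hit returns the candidate
def crkScan (records : List (List (String × List (List (String × Int))))) (c : String) : Bool :=
  records.any (fun record => (crkReadings record).any (fun reading => crkHit reading c))

-- the ValueError branch is excluded by Pre_; the port returns "" there
def choose_reading_key (records : List (List (String × List (List (String × Int))))) (requested_key : String) : String :=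
  if requested_key ≠ "auto" then requested_key
  else if crkScan records "scope_power_w" then "scope_power_w"
  else if crkScan records "pwr_pw" then "pwr_pw"
  else ""

-- ===== PORT B =====
-- B's inner loop over the readings of one record: `none` = early return "scope_power_w",
-- `some flag` = loop finished with the updated pwr_seen flag
def crkGoReadings : List (List (String × Int)) → Bool → Option Bool
  | [], pwr => some pwr
  | reading :: rest, pwr =>
      if ((PySem.Dict.mk reading).get? "scope_power_w").isSome then none
      else crkGoReadings rest (pwr || ((PySem.Dict.mk reading).get? "pwr_pw").isSome)

-- B's outer loop over records, threading the pwr_seen flag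
def crkGoRecords : List (List (String × List (List (String × Int)))) → Bool → Option Bool
  | [], pwr => some pwr
  | record :: rest, pwr =>
      match crkGoReadings ((PySem.Dict.mk record).getD "readings" []) pwr with
      | none => none
      | some pwr' => crkGoRecords rest pwr'

-- the ValueError branch is excluded by Pre_; the port returns "" there
def choose_reading_key_alt (records : List (List (String × List (List (String × Int))))) (requested_key : String) : String :=
  if requested_key ≠ "auto" then requested_key
  else
    match crkGoRecords records false with
    | none => "scope_power_w"
    | some pwr => if pwr then "pwr_pw" else ""

-- ===== PRECONDITION & SPEC =====
-- Pre_ excludes exactly the inputs on which A raises ValueError (requested_key = "auto" and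
-- no reading contains either candidate key); B raises the same ValueError there.
def Pre_choose_reading_key (records : List (List (String × List (List (String × Int))))) (requested_key : String) : Prop :=
  requested_key ≠ "auto" ∨
    ∃ record ∈ records, ∃ reading ∈ (PySem.Dict.mk record).getD "readings" [],
      ((PySem.Dict.mk reading).get? "scope_power_w").isSome = true ∨
      ((PySem.Dict.mk reading).get? "pwr_pw").isSome = true
instance (records : List (List (String × List (List (String × Int))))) (requested_key : String) : Decidable (Pre_choose_reading_key records requested_key) := by unfold Pre_choose_reading_key; infer_instance

def pvWitness_choose_reading_key : (List (List (String × List (List (String × Int))))) × String :=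
  ([[("readings", [[("pwr_pw", 3)]])]], "auto")

def Spec_choose_reading_key (records : List (List (String × List (List (String × Int))))) (requested_key : String) (out : String) : Prop := out = choose_reading_key_alt records requested_key
instance (records : List (List (String × List (List (String × Int))))) (requested_key : String) (out : String) : Decidable (Spec_choose_reading_key records requested_key out) := by unfold Spec_choose_reading_key; infer_instance

-- ===== CLAIM (what is proved, stated in full; the proofs are below) =====
def Claim_equal_choose_reading_key : Prop := ∀ (records : List (List (String × List (List (String × Int))))) (requested_key : String), Dom_choose_reading_key records requested_key → Pre_choose_reading_key records requested_key → Spec_choose_reading_key records requested_key (choose_reading_key records requested_key)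

-- ===== LEMMAS AND PROOFS =====

-- closed form of B's inner loop in terms of A's per-reading scans
theorem crkGoReadings_eq (rds : List (List (String × Int))) : ∀ (pwr : Bool),
    crkGoReadings rds pwr =
      if rds.any (fun r => crkHit r "scope_power_w") then none
      else some (pwr || rds.any (fun r => crkHit r "pwr_pw")) := by
  induction rds with
  | nil => simp [crkGoReadings]
  | cons r rs ih =>
      intro pwr
      cases h1 : ((PySem.Dict.mk r).get? "scope_power_w").isSome with
      | true => simp [crkGoReadings, crkHit, h1]
      | false => simp [crkGoReadings, crkHit, h1, ih, Bool.or_assoc]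

-- closed form of B's outer loop in terms of A's scans
theorem crkGoRecords_eq (records : List (List (String × List (List (String × Int))))) :
    ∀ (pwr : Bool),
    crkGoRecords records pwr =
      if crkScan records "scope_power_w" then none
      else some (pwr || crkScan records "pwr_pw") := by
  induction records with
  | nil => simp [crkGoRecords, crkScan]
  | cons rec rest ih =>
      intro pwr
      simp only [crkGoRecords, crkGoReadings_eq]
      cases h1 : ((PySem.Dict.mk rec).getD "readings" []).any (fun r => crkHit r "scope_power_w") with
      | true => simp [crkScan, crkReadings, h1]
      | false => simp [crkScan, crkReadings, h1, ih, Bool.or_assoc]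

-- ===== VERDICT (by name: the statement is the Claim_ definition above) =====
theorem choose_reading_key_spec : Claim_equal_choose_reading_key := by
  intro records requested_key _ hpre
  unfold Spec_choose_reading_key choose_reading_key choose_reading_key_alt
  by_cases hk : requested_key ≠ "auto"
  · simp [hk]
  · simp only [hk, if_false, crkGoRecords_eq]
    have hpre' : crkScan records "scope_power_w" = true ∨ crkScan records "pwr_pw" = true := by
      rcases hpre with h | ⟨record, hrec, reading, hrd, h | h⟩
      · exact absurd h hk
      · left
        simp only [crkScan, crkReadings, crkHit, List.any_eq_true]
        exact ⟨record, hrec, reading, hrd, h⟩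
      · right
        simp only [crkScan, crkReadings, crkHit, List.any_eq_true]
        exact ⟨record, hrec, reading, hrd, h⟩
    by_cases h1 : crkScan records "scope_power_w" = true
    · simp [h1]
    · rcases hpre' with h | h2
      · exact absurd h h1
      · simp [h1, h2] at *
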